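-- pv_equiv track=rewrite | github.com/kannasuresh99/Leet-code-problem-solutions | two_sum.py | get_first_value_index
-- ===== SOURCE A (Python) =====
-- def get_first_value_index(nums,target):
--     result = []
--     first_index_value = None
--     if target < 0:
--         for index in range(0,len(nums)):
--             if nums[index] != None and nums[index] > target:
--                 first_index_value = index
--                 result.append(first_index_value)
--                 break
--     else:
--         if target == 0:
--             for index in range(0,len(nums)):
--                 if nums[index] <= 0:
--                     result.append(index)
--                     break
--         else:
--             max_value = max(filter(lambda v: v is not None, nums))
--             min_value = min(filter(lambda v: v is not None, nums))
--             if min_value > 0: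
--                 while first_index_value == None:
--                     if max_value < target:
--                         first_index_value = nums.index(max_value)
--                         result.append(first_index_value)
--                         break
--                     else:
--                         nums[nums.index(max_value)] = None
--                         max_value = max(filter(lambda v: v is not None, nums))
--             elif min_value < 0:
--                 first_index_value = nums.index(min_value)
--                 result.append(first_index_value)
--     return result
-- ===== SOURCE B (Python) =====
-- def get_first_value_index(nums, target):
--     if target < 0:
--         return next(([i] for i, v in enumerate(nums) if v is not None and v > target), [])
--     if target == 0:
--         return next(([i] for i, v in enumerate(nums) if v <= 0), [])
--     vals = [v for v in nums if v is not None]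
--     mn = min(vals)
--     if mn < 0:
--         return [nums.index(mn)]
--     if mn == 0:
--         return []
--     best = max(v for v in vals if v < target)
--     return [nums.index(best)]
-- ===== Notes on version B (the rewrite author's own statement) =====
-- stated objective: faster
-- what changed: For target>0 the destructive repeated-max loop (recompute max over the list, blank out each entry >= target, repeat until the max drops below target) is replaced by one filter of the non-None values and a single max over those below target; the two scan branches become first-match generator expressions.
import Mathlib
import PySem

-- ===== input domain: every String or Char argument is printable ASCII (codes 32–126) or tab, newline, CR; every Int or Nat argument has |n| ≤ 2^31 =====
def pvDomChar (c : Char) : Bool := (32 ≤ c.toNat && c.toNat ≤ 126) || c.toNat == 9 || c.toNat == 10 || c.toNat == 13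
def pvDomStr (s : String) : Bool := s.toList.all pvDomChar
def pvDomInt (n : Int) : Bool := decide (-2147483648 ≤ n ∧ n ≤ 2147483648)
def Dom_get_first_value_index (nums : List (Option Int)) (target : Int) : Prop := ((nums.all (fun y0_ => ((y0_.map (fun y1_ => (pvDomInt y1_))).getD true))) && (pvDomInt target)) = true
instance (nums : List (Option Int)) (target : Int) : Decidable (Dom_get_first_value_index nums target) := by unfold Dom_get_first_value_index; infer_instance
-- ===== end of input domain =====

-- B replaces A's O(n^2) destructive repeated-max loop by one filter plus a single max (faster);
-- return values only: A mutates nums in place in its target>0 loop (blanks entries to None), B does not.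

-- ===== PORT A =====

-- max(filter(lambda v: v is not None, nums)) / min(...): none = ValueError on empty
def pvMaxA (nums : List (Option Int)) : Option Int := PySem.List.max? (nums.filterMap id) (fun v => v)
def pvMinA (nums : List (Option Int)) : Option Int := PySem.List.min? (nums.filterMap id) (fun v => v)

-- the target<0 for-loop with break (index counter i)
def pvScanNegA (nums : List (Option Int)) (target : Int) (i : Int) : List Int :=
  match nums with
  | [] => []
  | none :: rest => pvScanNegA rest target (i + 1)
  | some x :: rest => if x > target then [i] else pvScanNegA rest target (i + 1)

-- the target==0 for-loop; 'nums[index] <= 0' raises TypeError on None: none = that raise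
def pvScanZeroA (nums : List (Option Int)) (i : Int) : Option (List Int) :=
  match nums with
  | [] => some []
  | none :: _ => none
  | some x :: rest => if x ≤ 0 then some [i] else pvScanZeroA rest (i + 1)

-- the while loop: if max < target take its first index, else blank that entry and recompute max;
-- fuel only makes the recursion structural (none = the loop's ValueError when the list empties)
def pvLoopA : Nat → List (Option Int) → Int → Int → Option (List Int)
  | 0, _, _, _ => none
  | fuel + 1, nums, target, mx =>
    if mx < target then
      (PySem.List.index? nums (some mx)).map (fun i => [(i : Int)])
    else
      match PySem.List.index? nums (some mx) with
      | none => none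
      | some i =>
        let nums' := nums.set i none
        match pvMaxA nums' with
        | none => none
        | some mx' => pvLoopA fuel nums' target mx'

def get_first_value_index (nums : List (Option Int)) (target : Int) : List Int :=
  if target < 0 then pvScanNegA nums target 0
  else if target = 0 then (pvScanZeroA nums 0).getD []
  else
    match pvMaxA nums, pvMinA nums with
    | some mx, some mn =>
      if mn > 0 then (pvLoopA (nums.length + 1) nums target mx).getD []
      else if mn < 0 then ((PySem.List.index? nums (some mn)).map (fun i => [(i : Int)])).getD []
      else []
    | _, _ => []   -- max/min of empty: ValueError, excluded by Pre_

-- ===== PORT B =====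

-- next(([i] for i, v in enumerate(nums) if v is not None and v > target), [])
def pvPredNegB (target : Int) (p : Int × Option Int) : Bool :=
  match p.2 with
  | some x => decide (x > target)
  | none => false

-- the target==0 generator evaluates 'v <= 0', which raises on None: the none case is that raise
def pvPredZeroB (p : Int × Option Int) : Bool :=
  match p.2 with
  | some x => decide (x ≤ 0)
  | none => true

def get_first_value_index_alt (nums : List (Option Int)) (target : Int) : List Int :=
  if target < 0 then
    match (PySem.List.enumerate nums).find? (pvPredNegB target) with
    | some p => [p.1]
    | none => []
  else if target = 0 then
    match (PySem.List.enumerate nums).find? pvPredZeroB with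
    | some (i, some _) => [i]
    | some (_, none) => []   -- TypeError in Python, excluded by Pre_
    | none => []
  else
    let vals := nums.filterMap id
    match PySem.List.min? vals (fun v => v) with
    | none => []   -- min of empty: ValueError, excluded by Pre_
    | some mn =>
      if mn < 0 then ((PySem.List.index? nums (some mn)).map (fun i => [(i : Int)])).getD []
      else if mn = 0 then []
      else
        match PySem.List.max? (vals.filter (fun v => decide (v < target))) (fun v => v) with
        | none => []   -- max of empty generator: ValueError, excluded by Pre_
        | some best => ((PySem.List.index? nums (some best)).map (fun i => [(i : Int)])).getD []

-- ===== PRECONDITION & SPEC =====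

-- Pre_ excludes exactly the inputs where A raises (B raises there too): for target==0 a None entry
-- reached before any value <= 0 (TypeError); for target>0 a list with no non-None value, or one whose
-- non-None values are all positive with none below target (ValueError, after the loop empties the list).
-- none-or-nonpositive: the first element of nums that is None or <= 0 must not be a None
def pvNonposOrNone (v : Option Int) : Bool :=
  match v with
  | none => true
  | some x => decide (x ≤ 0)

def Pre_get_first_value_index (nums : List (Option Int)) (target : Int) : Prop :=
  (target = 0 → nums.find? pvNonposOrNone ≠ some none) ∧
  (0 < target → nums.filterMap id ≠ [] ∧
    ((∀ v ∈ nums.filterMap id, 0 < v) → ∃ v ∈ nums.filterMap id, v < target))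

instance (nums : List (Option Int)) (target : Int) : Decidable (Pre_get_first_value_index nums target) := by
  unfold Pre_get_first_value_index; infer_instance

def pvWitness_get_first_value_index : List (Option Int) × Int := ([some 3, none, some 1, some 7], 5)

def Spec_get_first_value_index (nums : List (Option Int)) (target : Int) (out : List Int) : Prop := out = get_first_value_index_alt nums target
instance (nums : List (Option Int)) (target : Int) (out : List Int) : Decidable (Spec_get_first_value_index nums target out) := by unfold Spec_get_first_value_index; infer_instance

-- ===== CLAIM (what is proved, stated in full; the proofs are below) =====
def Claim_equal_get_first_value_index : Prop := ∀ (nums : List (Option Int)) (target : Int), Dom_get_first_value_index nums target → Pre_get_first_value_index nums target → Spec_get_first_value_index nums target (get_first_value_index nums target)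

-- ===== LEMMAS AND PROOFS =====

-- replacing one element that is not the searched value by another such element keeps the first index
lemma pvIndex?_congr (pre suf : List (Option Int)) (a b v : Option Int)
    (ha : a ≠ v) (hb : b ≠ v) :
    PySem.List.index? (pre ++ a :: suf) v = PySem.List.index? (pre ++ b :: suf) v := by
  induction pre with
  | nil =>
    simp only [List.nil_append]
    rw [PySem.List.index?_cons_of_ne _ ha, PySem.List.index?_cons_of_ne _ hb]
  | cons h t ih =>
    by_cases hv : h = v
    · subst hv
      simp only [List.cons_append, PySem.List.index?_cons_self]
    · simp only [List.cons_append]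
      rw [PySem.List.index?_cons_of_ne _ hv, PySem.List.index?_cons_of_ne _ hv, ih]

-- A's target<0 scan is B's first-match over enumerate
lemma pvScanNegA_eq (target : Int) :
    ∀ (nums : List (Option Int)) (s : Int),
    pvScanNegA nums target s =
      (match (PySem.List.enumerate nums s).find? (pvPredNegB target) with
       | some p => [p.1]
       | none => ([] : List Int))
  | [], s => by simp [pvScanNegA, PySem.List.enumerate]
  | none :: rest, s => by
    rw [PySem.List.enumerate_cons]
    simpa [pvScanNegA, pvPredNegB] using pvScanNegA_eq target rest (s + 1)
  | some x :: rest, s => by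
    rw [PySem.List.enumerate_cons]
    by_cases hx : x > target
    · simp [pvScanNegA, pvPredNegB, hx]
    · simpa [pvScanNegA, pvPredNegB, hx] using pvScanNegA_eq target rest (s + 1)

-- A's target==0 scan is B's first-match over enumerate, given that no None is hit first
lemma pvScanZeroA_eq :
    ∀ (nums : List (Option Int)) (s : Int),
    nums.find? pvNonposOrNone ≠ some none →
    (pvScanZeroA nums s).getD [] =
      (match (PySem.List.enumerate nums s).find? pvPredZeroB with
       | some (i, some _) => [i]
       | some (_, none) => ([] : List Int)
       | none => ([] : List Int))
  | [], s, _ => by simp [pvScanZeroA, PySem.List.enumerate]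
  | none :: rest, s, h => by
    exact absurd (by simp [pvNonposOrNone]) h
  | some x :: rest, s, h => by
    rw [PySem.List.enumerate_cons]
    by_cases hx : x ≤ 0
    · simp [pvScanZeroA, pvPredZeroB, hx]
    · have h' : rest.find? pvNonposOrNone ≠ some none := by
        simpa [List.find?_cons, pvNonposOrNone, hx] using h
      simpa [pvScanZeroA, pvPredZeroB, hx] using pvScanZeroA_eq rest (s + 1) h'

-- A's destructive while loop computes B's single max over the values below target
lemma pvLoopA_eq (fuel : Nat) :
    ∀ (nums : List (Option Int)) (target mx : Int),
    pvMaxA nums = some mx →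
    (∃ v ∈ nums.filterMap id, v < target) →
    ((nums.filterMap id).filter (fun v => decide (¬ v < target))).length < fuel →
    pvLoopA fuel nums target mx =
      (match PySem.List.max? ((nums.filterMap id).filter (fun v => decide (v < target))) (fun v => v) with
       | none => none
       | some best => (PySem.List.index? nums (some best)).map (fun i => [(i : Int)])) := by
  induction fuel with
  | zero => intro nums target mx _ _ hlen; omega
  | succ k ih =>
    intro nums target mx hmax hex hlen
    simp only [pvLoopA]
    by_cases hmx : mx < target
    · simp only [if_pos hmx]
      have hall : ∀ v ∈ nums.filterMap id, decide (v < target) = true := by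
        intro v hv
        have hle : v ≤ mx := PySem.List.max?_isMax hmax v hv
        simp only [decide_eq_true_eq]; omega
      rw [List.filter_eq_self.mpr hall]
      rw [show PySem.List.max? (nums.filterMap id) (fun v => v) = pvMaxA nums from rfl, hmax]
    · simp only [if_neg hmx]
      have hmem : mx ∈ nums.filterMap id := PySem.List.max?_mem hmax
      have hsmem : some mx ∈ nums := by
        rcases List.mem_filterMap.mp hmem with ⟨a, ha, hae⟩
        simpa [show a = some mx from hae] using ha
      obtain ⟨i, hidx⟩ :=
        Option.isSome_iff_exists.mp ((PySem.List.index?_isSome_iff nums (some mx)).mpr hsmem)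
      rw [hidx]
      dsimp only
      obtain ⟨pre, suf, hsplit, hlenp, _⟩ :=
        (PySem.List.index?_eq_some_iff nums (some mx) i).mp hidx
      subst hsplit
      have hset : (pre ++ some mx :: suf).set i none = pre ++ none :: suf := by
        rw [← hlenp]; simp
      rw [hset]
      have hvals : (pre ++ some mx :: suf).filterMap id
          = pre.filterMap id ++ mx :: suf.filterMap id := by simp
      have hvals' : (pre ++ none :: suf).filterMap id
          = pre.filterMap id ++ suf.filterMap id := by simp
      -- the witness below target is not mx and survives the blanking
      obtain ⟨v, hv, hvt⟩ := hex
      have hvne : v ≠ mx := by omega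
      have hv' : v ∈ (pre ++ none :: suf).filterMap id := by
        rw [hvals']
        rcases List.mem_append.mp (hvals ▸ hv) with h | h
        · exact List.mem_append.mpr (Or.inl h)
        · rcases List.mem_cons.mp h with h | h
          · exact absurd h hvne
          · exact List.mem_append.mpr (Or.inr h)
      -- entries below target are untouched: the filtered value lists agree
      have hfilter : ((pre ++ none :: suf).filterMap id).filter (fun v => decide (v < target))
          = ((pre ++ some mx :: suf).filterMap id).filter (fun v => decide (v < target)) := by
        rw [hvals, hvals']
        simp [List.filter_append, hmx]
      cases hmax' : pvMaxA (pre ++ none :: suf) with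
      | none =>
        have : (pre ++ none :: suf).filterMap id = [] :=
          (PySem.List.max?_eq_none_iff _ _).mp hmax'
        rw [this] at hv'
        exact absurd hv' (List.not_mem_nil)
      | some mx' =>
        have hlen' : (((pre ++ none :: suf).filterMap id).filter
            (fun v => decide (¬ v < target))).length < k := by
          rw [hvals] at hlen
          rw [hvals']
          simp [List.filter_append, show target ≤ mx by omega] at hlen ⊢
          omega
        dsimp only
        rw [ih (pre ++ none :: suf) target mx' hmax' ⟨v, hv', hvt⟩ hlen']
        rw [hfilter]
        cases hbest : PySem.List.max? (((pre ++ some mx :: suf).filterMap id).filter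
            (fun v => decide (v < target))) (fun v => v) with
        | none => rfl
        | some best =>
          have hbt : best < target := by
            have := List.of_mem_filter (PySem.List.max?_mem hbest)
            simpa using this
          dsimp only
          rw [pvIndex?_congr pre suf none (some mx) (some best)
            (by simp) (by simp only [ne_eq, Option.some.injEq]; omega)]

-- ===== VERDICT (by name: the statement is the Claim_ definition above) =====
theorem get_first_value_index_spec : Claim_equal_get_first_value_index := by
  intro nums target _ hpre
  unfold Spec_get_first_value_index get_first_value_index get_first_value_index_alt
  by_cases hneg : target < 0
  · simp only [if_pos hneg]
    exact pvScanNegA_eq target nums 0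
  · by_cases h0 : target = 0
    · subst h0
      simp only [if_neg hneg]
      exact pvScanZeroA_eq nums 0 (hpre.1 rfl)
    · have hpos : 0 < target := by omega
      obtain ⟨hne, himp⟩ := hpre.2 hpos
      simp only [if_neg hneg, if_neg h0]
      cases hmax : pvMaxA nums with
      | none =>
        exact absurd ((PySem.List.max?_eq_none_iff _ _).mp hmax) hne
      | some mx =>
        cases hmin : pvMinA nums with
        | none =>
          exact absurd ((PySem.List.min?_eq_none_iff _ _).mp hmin) hne
        | some mn =>
          rw [show PySem.List.min? (nums.filterMap id) (fun v => v) = pvMinA nums from rfl, hmin]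
          by_cases hmn_pos : mn > 0
          · simp only [if_pos hmn_pos,
              if_neg (show ¬ mn < 0 by omega), if_neg (show ¬ mn = 0 by omega)]
            have hall : ∀ v ∈ nums.filterMap id, 0 < v := by
              intro v hv
              have := PySem.List.min?_isMin hmin v hv
              simp at this; omega
            obtain ⟨v, hv, hvt⟩ := himp hall
            have hfuel : (((nums.filterMap id).filter
                (fun v => decide (¬ v < target))).length < nums.length + 1) := by
              have h1 : ((nums.filterMap id).filter
                  (fun v => decide (¬ v < target))).length ≤ (nums.filterMap id).length :=
                List.length_filter_le _ _
              have h2 : (nums.filterMap id).length ≤ nums.length :=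
                List.length_filterMap_le id nums
              omega
            rw [pvLoopA_eq (nums.length + 1) nums target mx hmax ⟨v, hv, hvt⟩ hfuel]
            cases PySem.List.max? ((nums.filterMap id).filter
                (fun v => decide (v < target))) (fun v => v) with
            | none => rfl
            | some best => rfl
          · by_cases hmn_neg : mn < 0
            · simp only [if_neg hmn_pos, if_pos hmn_neg]
            · simp only [if_neg hmn_pos, if_neg hmn_neg, if_pos (show mn = 0 by omega)]
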